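-- pv_equiv track=rewrite | github.com/elliott-ribner/social_network | social.py | create_data_structure
-- ===== SOURCE A (Python) =====
-- def create_data_structure(string_input):
--     #dictionary that will be returned for data structure
--     splitDict = {}
--     #we establish to variables to keep track of index while searching, all our searches will
--     #be based on these, also we will use these as well nameEnd below to establish entries in data structure
--     startPosition = 0
--     nextStart = 0
--     endPosition = len(string_input)
--     while nextStart != -1:
--         #this establishes location of next period thereby allowing us to split each sentence, below
--         #we recycle this value by assigning statposition to the next index value after this location
--         #thus allowing us to move to the next sentence.
--         nextStart = string_input.find('.', startPosition, endPosition)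
--         if nextStart !=-1:
--             #every name is at the begining of the sentence so we can identify name as the the letters
--             #between the start and the first space as seen below
--             nameEnd= string_input.find(' ', startPosition, endPosition)
--             if string_input[startPosition:nameEnd] not in splitDict:
--                 #if name is not yet in dictionary we can add it and assign the key friends as the result of the function below
--                 splitDict[string_input[startPosition:nameEnd]] = splitFriends(string_input[nameEnd:nextStart + 1])
--             else:
--                 #since friends always cames before games we can assume that if the name already exists that we
--                 #this sentence is describing games and we can update the string with (splitGames(string_input[nameEnd:nextStart + 1]))
--                 splitDict[string_input[startPosition:nameEnd]].update(splitGames(string_input[nameEnd:nextStart + 1]))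
--                 None
--             startPosition = nextStart + 1
--     return splitDict
--
-- def splitFriends(friends):
--     tempList=[]
--     #first we delete is connected to from string
--     friends=friends.replace(" is connected to","")
--     position = 0
--     nextPosition = 0
--     # everything left in the string is just the friends so we can loop through the string using commas
--     #to determine the start/end of each friend
--     while nextPosition != -1:
--         nextPosition = friends.find(',' , position  , len(friends) )
--         tempList.extend([friends[position+1 :nextPosition  ]])
--         position = nextPosition + 1
--     tempDict= { 'friends': tempList }
--     return tempDict
--
-- def splitGames(games):
--     tempList=[]
--     #first we delete likes to play from string
--     games=games.replace(" likes to play","")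
--     position = 0
--     nextPosition = 0
--     # everything left in the string is just the games so we can loop through the string using commas
--     #to determine the start/end of each game
--     while nextPosition != -1:
--         nextPosition = games.find(',' , position  , len(games) )
--         tempList.extend([games[position+1 :nextPosition]])
--         position = nextPosition + 1
--     tempDict= { 'games': tempList }
--     return tempDict
-- ===== SOURCE B (Python) =====
-- def create_data_structure(string_input):
--     result = {}
--     for sentence in string_input.split('.')[:-1]:
--         i = sentence.index(' ')
--         name, rest = sentence[:i], sentence[i:]
--         if name not in result:
--             result[name] = {'friends': [f[1:] for f in rest.replace(" is connected to", "").split(',')]}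
--         else:
--             result[name]['games'] = [g[1:] for g in rest.replace(" likes to play", "").split(',')]
--     return result
-- ===== Notes on version B (the rewrite author's own statement) =====
-- stated objective: idiomatic
-- what changed: B replaces A's manual index-cursor scanning (repeated find calls over absolute positions, with two copy-pasted comma-scanner helpers) by the idiomatic split approach: iterate over the period-separated sentences (dropping the tail), cut each sentence at its first space, and build each friends/games list as a comprehension over the comma-separated remainder.
-- outside the precondition, e.g. on create_data_structure('.'): A returns {'': {'friends': ['']}}, B raises ValueError
import Mathlib
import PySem

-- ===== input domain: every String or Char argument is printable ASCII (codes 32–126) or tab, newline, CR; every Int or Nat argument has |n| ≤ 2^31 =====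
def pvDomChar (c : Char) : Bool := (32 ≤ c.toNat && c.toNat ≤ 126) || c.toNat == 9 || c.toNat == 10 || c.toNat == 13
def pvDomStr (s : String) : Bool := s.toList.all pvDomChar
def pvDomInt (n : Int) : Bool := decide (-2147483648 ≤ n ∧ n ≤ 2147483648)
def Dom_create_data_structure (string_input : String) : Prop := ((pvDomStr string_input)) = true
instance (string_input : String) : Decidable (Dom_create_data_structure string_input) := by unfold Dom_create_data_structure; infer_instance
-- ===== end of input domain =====

-- B rewrites A's manual index-cursor scanning with idiomatic split('.')/split(',') passes; equal on Pre_ (return value only).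


-- ===== PORT A =====
-- A's comma-scanner while-loop, shared verbatim by splitFriends and splitGames
-- (the two Python helpers contain the identical loop; find(',', position, len(v)) ≡ find(',', position)).
def pvCommaLoopA (v : List Char) : Nat → Nat → List (List Char) → List (List Char)
  | 0, _, acc => acc
  | fuel+1, pos, acc =>
    let next := PySem.Chars.findFrom v [','] (pos : Int) none
    let field := PySem.List.slice v (some ((pos : Int) + 1)) (some next)
    if next = -1 then acc ++ [field]
    else pvCommaLoopA v fuel (next.toNat + 1) (acc ++ [field])

def pvSplitFriendsA (friends : List Char) : PySem.Dict (List Char) (List (List Char)) :=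
  let friends2 := PySem.Chars.replace friends (" is connected to".toList) []
  let tempList := pvCommaLoopA friends2 (friends2.length + 2) 0 []
  PySem.Dict.empty.insert ("friends".toList) tempList

def pvSplitGamesA (games : List Char) : PySem.Dict (List Char) (List (List Char)) :=
  let games2 := PySem.Chars.replace games (" likes to play".toList) []
  let tempList := pvCommaLoopA games2 (games2.length + 2) 0 []
  PySem.Dict.empty.insert ("games".toList) tempList

-- A's outer while-loop: startPosition cursor, find('.', start) / find(' ', start)
-- (find(sub, start, len(s)) ≡ find(sub, start)).
def pvLoopA (cs : List Char) :
    Nat → Nat → PySem.Dict (List Char) (PySem.Dict (List Char) (List (List Char))) →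
    PySem.Dict (List Char) (PySem.Dict (List Char) (List (List Char)))
  | 0, _, d => d
  | fuel+1, start, d =>
    let nextStart := PySem.Chars.findFrom cs ['.'] (start : Int) none
    if nextStart = -1 then d
    else
      let nameEnd := PySem.Chars.findFrom cs [' '] (start : Int) none
      let name := PySem.List.slice cs (some (start : Int)) (some nameEnd)
      let d' :=
        if d.contains name = false then
          d.insert name (pvSplitFriendsA (PySem.List.slice cs (some nameEnd) (some (nextStart + 1))))
        else
          d.modify name PySem.Dict.empty
            (fun inner => inner.update (pvSplitGamesA (PySem.List.slice cs (some nameEnd) (some (nextStart + 1)))).items)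
      pvLoopA cs fuel (nextStart.toNat + 1) d'

-- render the dict-of-dicts as the association-list output type
def pvRender (d : PySem.Dict (List Char) (PySem.Dict (List Char) (List (List Char)))) :
    List (String × List (String × List String)) :=
  d.items.map (fun p => (String.ofList p.1, p.2.items.map (fun q => (String.ofList q.1, q.2.map String.ofList))))

def create_data_structure (string_input : String) : List (String × List (String × List String)) :=
  pvRender (pvLoopA string_input.toList (string_input.toList.length + 2) 0 PySem.Dict.empty)

-- ===== PORT B =====
-- one step of B's for-loop over sentences
def pvStepB (d : PySem.Dict (List Char) (PySem.Dict (List Char) (List (List Char)))) (sentence : List Char) :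
    PySem.Dict (List Char) (PySem.Dict (List Char) (List (List Char))) :=
  let i := PySem.Chars.find sentence [' ']   -- the sentence.index search for the first space; Pre_ guarantees it exists
  let name := PySem.List.slice sentence none (some i)
  let rest := PySem.List.slice sentence (some i) none
  if d.contains name = false then
    d.insert name (PySem.Dict.empty.insert ("friends".toList)
      ((PySem.Chars.splitOn (PySem.Chars.replace rest (" is connected to".toList) []) [',']).map
        (fun f => PySem.List.slice f (some 1) none)))
  else
    d.modify name PySem.Dict.empty (fun inner => inner.insert ("games".toList)
      ((PySem.Chars.splitOn (PySem.Chars.replace rest (" likes to play".toList) []) [',']).map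
        (fun g => PySem.List.slice g (some 1) none)))

def create_data_structure_alt (string_input : String) : List (String × List (String × List String)) :=
  pvRender (((PySem.Chars.splitOn string_input.toList ['.']).dropLast).foldl pvStepB PySem.Dict.empty)

-- ===== PRECONDITION & SPEC =====
-- Pre_ excludes inputs where some period-terminated sentence contains no space: there A's name-search
-- bleeds past the sentence boundary (an accident of searching the whole string), and B's first-space
-- index lookup raises ValueError.
def Pre_create_data_structure (string_input : String) : Prop :=
  ∀ seg ∈ (PySem.Chars.splitOn string_input.toList ['.']).dropLast, ' ' ∈ seg
instance (string_input : String) : Decidable (Pre_create_data_structure string_input) := by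
  unfold Pre_create_data_structure; infer_instance
def pvWitness_create_data_structure : String := "a b.a c."
def Spec_create_data_structure (string_input : String) (out : List (String × List (String × List String))) : Prop := out = create_data_structure_alt string_input
instance (string_input : String) (out : List (String × List (String × List String))) : Decidable (Spec_create_data_structure string_input out) := by unfold Spec_create_data_structure; infer_instance

-- ===== CLAIM (what is proved, stated in full; the proofs are below) =====
def Claim_equal_create_data_structure : Prop := ∀ (string_input : String), Dom_create_data_structure string_input → Pre_create_data_structure string_input → Spec_create_data_structure string_input (create_data_structure string_input)

-- ===== LEMMAS AND PROOFS =====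

theorem pvDecomp {c : Char} {u : List Char} (h : c ∈ u) :
    ∃ s1 s2, u = s1 ++ c :: s2 ∧ c ∉ s1 := by
  induction u with
  | nil => cases h
  | cons a t ih =>
    by_cases hac : a = c
    · exact ⟨[], t, by simp [hac], by simp⟩
    · have ht : c ∈ t := by
        rcases List.mem_cons.1 h with h' | h'
        · exact absurd h'.symm hac
        · exact h'
      rcases ih ht with ⟨s1, s2, he, hn⟩
      refine ⟨a :: s1, s2, by simp [he], ?_⟩
      simp [hn]; intro hh; exact hac hh.symm

theorem pvGoFuel (d : Char) : ∀ (l : List Char) (f1 f2 : Nat) (cur : List Char) (acc : List (List Char)),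
    l.length < f1 → l.length < f2 →
    PySem.Chars.splitOn.go [d] f1 l cur acc = PySem.Chars.splitOn.go [d] f2 l cur acc := by
  intro l
  induction l with
  | nil =>
    intro f1 f2 cur acc h1 h2
    match f1, f2 with
    | n1+1, n2+1 => rw [PySem.Chars.splitOn.go, PySem.Chars.splitOn.go] <;> simp
  | cons a t ih =>
    intro f1 f2 cur acc h1 h2
    simp only [List.length_cons] at h1 h2
    match f1, f2 with
    | n1+1, n2+1 =>
      rw [PySem.Chars.splitOn.go, PySem.Chars.splitOn.go]
      by_cases hp : [d].isPrefixOf (a :: t)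
      · simp only [hp, if_true, List.length_singleton, List.drop_succ_cons, List.drop_zero]
        exact ih n1 n2 [] _ (by omega) (by omega)
      · simp only [hp, Bool.false_eq_true, if_false]
        exact ih n1 n2 _ _ (by omega) (by omega)

-- splitOn.go: accumulator append
theorem pvGoAcc (d : Char) : ∀ (f : Nat) (l cur : List Char) (acc : List (List Char)),
    PySem.Chars.splitOn.go [d] f l cur acc = acc.reverse ++ PySem.Chars.splitOn.go [d] f l cur [] := by
  intro f
  induction f with
  | zero => intro l cur acc; rw [PySem.Chars.splitOn.go, PySem.Chars.splitOn.go]; simp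
  | succ n ih =>
    intro l cur acc
    cases l with
    | nil =>
      rw [PySem.Chars.splitOn.go, PySem.Chars.splitOn.go] <;> simp
    | cons a t =>
      rw [PySem.Chars.splitOn.go]
      conv_rhs => rw [PySem.Chars.splitOn.go]
      by_cases hp : [d].isPrefixOf (a :: t)
      · simp only [hp, if_true]
        rw [ih _ [] (cur.reverse :: acc), ih _ [] [cur.reverse]]
        simp
      · simp only [hp, Bool.false_eq_true, if_false]
        rw [ih t (a :: cur) acc]

-- splitOn on a list without the separator
theorem pvGoNoSep {d : Char} : ∀ (u : List Char), d ∉ u → ∀ (f : Nat) (cur : List Char) (acc : List (List Char)),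
    u.length < f →
    PySem.Chars.splitOn.go [d] f u cur acc = ((cur.reverse ++ u) :: acc).reverse := by
  intro u
  induction u with
  | nil => intro _ f cur acc hf
           match f with
           | n+1 => rw [PySem.Chars.splitOn.go] <;> simp
  | cons a t ih =>
    intro hmem f cur acc hf
    simp only [List.length_cons] at hf
    match f with
    | n+1 =>
      rw [PySem.Chars.splitOn.go]
      have hp : [d].isPrefixOf (a :: t) = false := by
        simp only [List.isPrefixOf, Bool.and_true, beq_eq_false_iff_ne, ne_eq]
        intro h; exact hmem (h ▸ List.mem_cons_self)
      simp only [hp, Bool.false_eq_true, if_false]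
      rw [ih (fun h => hmem (List.mem_cons_of_mem _ h)) n (a :: cur) acc (by omega)]
      simp

theorem pvSP1 {d : Char} {u : List Char} (h : d ∉ u) : PySem.Chars.splitOn u [d] = [u] := by
  unfold PySem.Chars.splitOn
  rw [pvGoNoSep u h _ [] [] (by omega)]
  simp

theorem pvGoSep {d : Char} : ∀ (s1 : List Char), d ∉ s1 → ∀ (f : Nat) (rest cur : List Char) (acc : List (List Char)),
    s1.length + 1 + rest.length < f →
    PySem.Chars.splitOn.go [d] f (s1 ++ d :: rest) cur acc =
      PySem.Chars.splitOn.go [d] (rest.length + 1) rest [] ((cur.reverse ++ s1) :: acc) := by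
  intro s1
  induction s1 with
  | nil =>
    intro _ f rest cur acc hf
    match f with
    | n+1 =>
      simp only [List.nil_append]
      rw [PySem.Chars.splitOn.go]
      have hp : [d].isPrefixOf (d :: rest) = true := by simp [List.isPrefixOf]
      simp only [hp, if_true, List.length_singleton, List.drop_succ_cons, List.drop_zero]
      rw [pvGoFuel d rest n (rest.length + 1) [] _ (by simp at hf; omega) (by omega)]
      simp
  | cons a t ih =>
    intro hmem f rest cur acc hf
    simp only [List.length_cons] at hf
    match f with
    | n+1 =>
      simp only [List.cons_append]
      rw [PySem.Chars.splitOn.go]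
      have hp : [d].isPrefixOf ((a :: t) ++ d :: rest) = false := by
        simp only [List.cons_append, List.isPrefixOf, Bool.and_true, beq_eq_false_iff_ne, ne_eq]
        intro h; exact (List.ne_and_not_mem_of_not_mem_cons hmem).1 h
      simp only [List.cons_append] at hp
      simp only [hp, Bool.false_eq_true, if_false]
      have := ih (List.ne_and_not_mem_of_not_mem_cons hmem).2 n rest (a :: cur) acc (by omega)
      simpa using this

theorem pvSP2 {d : Char} {s1 : List Char} (h : d ∉ s1) (rest : List Char) :
    PySem.Chars.splitOn (s1 ++ d :: rest) [d] = s1 :: PySem.Chars.splitOn rest [d] := by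
  unfold PySem.Chars.splitOn
  rw [pvGoSep s1 h _ rest [] [] (by simp; omega)]
  rw [pvGoAcc]
  simp

theorem pvSplitOnNeNil {d : Char} (u : List Char) : PySem.Chars.splitOn u [d] ≠ [] := by
  by_cases h : d ∈ u
  · obtain ⟨s1, s2, he, hn⟩ := pvDecomp h
    rw [he, pvSP2 hn]; simp
  · rw [pvSP1 h]; simp

theorem pvFindNeg {d : Char} {u : List Char} (h : d ∉ u) : PySem.Chars.find u [d] = -1 :=
  (PySem.Chars.find_eq_neg_one_iff u [d]).2 (fun hinf => h (hinf.subset (List.mem_singleton_self d)))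

theorem pvFindPos {d : Char} {s1 : List Char} (hn : d ∉ s1) (s2 : List Char) :
    PySem.Chars.find (s1 ++ d :: s2) [d] = (s1.length : Int) := by
  have hinf : [d] <:+: s1 ++ d :: s2 := ⟨s1, s2, by simp⟩
  have h0 : 0 ≤ PySem.Chars.find (s1 ++ d :: s2) [d] := (PySem.Chars.find_nonneg_iff _ _).2 hinf
  obtain ⟨hpre, hmin⟩ := PySem.Chars.find_spec h0
  set k := (PySem.Chars.find (s1 ++ d :: s2) [d]).toNat with hkdef
  have hub : k ≤ s1.length := by
    by_contra hcon
    rw [Nat.not_le] at hcon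
    refine hmin s1.length hcon ?_
    rw [List.drop_left]
    exact ⟨s2, rfl⟩
  have hlb : s1.length ≤ k := by
    by_contra hcon
    rw [Nat.not_le] at hcon
    rcases hpre with ⟨t, ht⟩
    rw [List.drop_append_of_le_length (le_of_lt hcon)] at ht
    cases hsd : s1.drop k with
    | nil =>
      have : s1.length - k = 0 := by simpa using congrArg List.length hsd
      omega
    | cons x xs =>
      rw [hsd] at ht
      simp only [List.cons_append, List.cons.injEq] at ht
      exact hn (ht.1 ▸ List.drop_subset k s1 (hsd ▸ List.mem_cons_self))
  have hk : k = s1.length := le_antisymm hub hlb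
  omega
theorem pvSliceNeg1 (xs : List Char) (p : Nat) :
    PySem.List.slice xs (some ((p:Int)+1)) (some (-1)) = (xs.drop (p+1)).dropLast := by
  have h : ((p:Int)+1) = ((p+1:Nat):Int) := by push_cast; ring
  have hc : PySem.List.clampIdx xs.length ((p:Int)+1) = min (p+1) xs.length := by
    rw [h, PySem.List.clampIdx_natCast]
  simp only [PySem.List.slice, hc, PySem.List.clampIdx_neg_one]
  rcases Nat.le_total (p+1) xs.length with hle | hle
  · rw [Nat.min_eq_left hle, List.dropLast_eq_take]
    simp only [List.length_drop]
    congr 1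
    omega
  · rw [Nat.min_eq_right hle, List.drop_eq_nil_of_le hle, List.drop_eq_nil_of_le (le_refl _)]
    simp

theorem pvUpdateSingle (inner : PySem.Dict (List Char) (List (List Char))) (k : List Char) (v : List (List Char)) :
    inner.update ((PySem.Dict.empty.insert k v).items) = inner.insert k v := by
  rw [PySem.Dict.items_insert_of_not_contains _ _ (PySem.Dict.contains_empty k)]
  simp [PySem.Dict.update, PySem.Dict.empty]

def pvMyFields (u : List Char) : List (List Char) :=
  ((PySem.Chars.splitOn u [',']).dropLast.map (fun f => f.drop 1)) ++
    [(((PySem.Chars.splitOn u [',']).getLastD []).drop 1).dropLast]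

theorem pvE1 {u : List Char} (h : ',' ∉ u) : pvMyFields u = [(u.drop 1).dropLast] := by
  unfold pvMyFields
  rw [pvSP1 h]
  simp

theorem pvE2 {u1 : List Char} (h : ',' ∉ u1) (u2 : List Char) :
    pvMyFields (u1 ++ ',' :: u2) = u1.drop 1 :: pvMyFields u2 := by
  unfold pvMyFields
  rw [pvSP2 h]
  have hne := pvSplitOnNeNil (d := ',') u2
  rw [List.dropLast_cons_of_ne_nil hne]
  simp only [List.map_cons, List.cons_append, List.cons.injEq]
  refine ⟨trivial, ?_⟩
  congr 2
  rw [List.getLastD_cons]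
  rw [List.getLastD_eq_getLast?, List.getLastD_eq_getLast?]
  cases hc : PySem.Chars.splitOn u2 [','] with
  | nil => exact absurd hc hne
  | cons a l =>
    cases hgl : (a :: l).getLast? with
    | none => simp at hgl
    | some x => simp

theorem pvTakeField (u1 : List Char) (x : Char) (u2 : List Char) :
    (((u1 ++ x :: u2).drop 1)).take (u1.length - 1) = u1.drop 1 := by
  cases u1 with
  | nil => simp
  | cons a t => simp

theorem pvDropDrop (v : List Char) (p q : Nat) : (v.drop p).drop q = v.drop (p + q) := by
  rw [List.drop_drop]

theorem pvInnerAux (v : List Char) : ∀ (fuel p : Nat) (acc : List (List Char)),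
    p ≤ v.length → v.length - p < fuel →
    pvCommaLoopA v fuel p acc = acc ++ pvMyFields (v.drop p) := by
  intro fuel
  induction fuel with
  | zero => intro p acc h1 h2; omega
  | succ n ih =>
    intro p acc hp hf
    simp only [pvCommaLoopA]
    rw [PySem.Chars.findFrom_natCast v [','] p hp]
    by_cases hmem : ',' ∈ v.drop p
    · obtain ⟨u1, u2, he, hn⟩ := pvDecomp hmem
      have hfind : PySem.Chars.find (v.drop p) [','] = (u1.length : Int) := by
        rw [he]; exact pvFindPos hn u2
      rw [hfind]
      have hne : ¬ ((u1.length : Int) = -1) := by omega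
      simp only [hne, if_false]
      have hlen : v.length - p = u1.length + 1 + u2.length := by
        have := congrArg List.length he
        simp at this
        omega
      have hcast1 : ((p:Int) + 1) = ((p+1 : Nat) : Int) := by push_cast; ring
      have hcast2 : ((p:Int) + (u1.length : Int)) = ((p + u1.length : Nat) : Int) := by push_cast; ring
      have hfield : PySem.List.slice v (some ((p:Int)+1)) (some ((p:Int)+(u1.length:Int))) = u1.drop 1 := by
        rw [hcast1, hcast2, PySem.List.slice_natCast]
        have : p + u1.length - (p + 1) = u1.length - 1 := by omega
        rw [this]
        have hdq : v.drop (p+1) = (u1 ++ ',' :: u2).drop 1 := by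
          rw [← he, pvDropDrop]
        rw [hdq]
        exact pvTakeField u1 ',' u2
      have hne2 : ¬ ((p:Int) + (u1.length:Int) = -1) := by omega
      simp only [hne2, if_false]
      have htn : ((p:Int) + (u1.length:Int)).toNat + 1 = p + u1.length + 1 := by omega
      rw [hfield, htn]
      rw [ih (p + u1.length + 1) (acc ++ [u1.drop 1]) (by omega) (by omega)]
      have hdrop2 : v.drop (p + u1.length + 1) = u2 := by
        have harith : p + u1.length + 1 = p + (u1.length + 1) := by omega
        rw [harith, ← pvDropDrop v p (u1.length + 1), he]
        simp
      rw [hdrop2, he, pvE2 hn u2]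
      simp
    · rw [pvFindNeg hmem]
      simp only [reduceIte]
      rw [pvSliceNeg1, pvE1 hmem]
      have : v.drop (p+1) = (v.drop p).drop 1 := by rw [pvDropDrop]
      rw [this]

theorem pvMyFieldsAppendAux : ∀ (n : Nat) (w : List Char), w.length ≤ n →
    pvMyFields (w ++ ['.']) = (PySem.Chars.splitOn w [',']).map (fun f => f.drop 1) := by
  intro n
  induction n with
  | zero =>
    intro w hw
    have hnil : w = [] := List.eq_nil_of_length_eq_zero (by omega)
    subst hnil
    rw [pvE1 (by decide), pvSP1 (by simp)]
    simp
  | succ n ih =>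
    intro w hw
    by_cases hmem : ',' ∈ w
    · obtain ⟨u1, u2, he, hn⟩ := pvDecomp hmem
      have hlen : u1.length + 1 + u2.length = w.length := by
        have := congrArg List.length he; simp at this; omega
      subst he
      have hassoc : (u1 ++ ',' :: u2) ++ ['.'] = u1 ++ ',' :: (u2 ++ ['.']) := by simp
      rw [hassoc, pvE2 hn (u2 ++ ['.']), ih u2 (by omega), pvSP2 hn u2]
      simp
    · have hmem2 : ',' ∉ w ++ ['.'] := by
        simp only [List.mem_append, List.mem_singleton]
        rintro (h | h)
        · exact hmem h
        · cases h
      rw [pvE1 hmem2, pvSP1 hmem]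
      cases w with
      | nil => simp
      | cons a t =>
        simp only [List.cons_append, List.drop_succ_cons, List.drop_zero, List.map_cons, List.map_nil]
        rw [List.dropLast_concat]

theorem pvMyFieldsAppend (w : List Char) :
    pvMyFields (w ++ ['.']) = (PySem.Chars.splitOn w [',']).map (fun f => f.drop 1) :=
  pvMyFieldsAppendAux w.length w (le_refl _)

theorem pvRepGoFuel (old new : List Char) (hold : old ≠ []) : ∀ (n : Nat) (l : List Char), l.length ≤ n →
    ∀ (f1 f2 : Nat) (acc : List Char), l.length ≤ f1 → l.length ≤ f2 →
    PySem.Chars.replace.go old new f1 l acc = PySem.Chars.replace.go old new f2 l acc := by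
  intro n
  induction n with
  | zero =>
    intro l hl f1 f2 acc h1 h2
    have : l = [] := List.eq_nil_of_length_eq_zero (by omega)
    subst this
    cases f1 <;> cases f2 <;> simp [PySem.Chars.replace.go.eq_def]
  | succ n ih =>
    intro l hl f1 f2 acc h1 h2
    cases l with
    | nil =>
      cases f1 <;> cases f2 <;> simp [PySem.Chars.replace.go.eq_def]
    | cons c t =>
      simp only [List.length_cons] at hl h1 h2
      match f1, f2 with
      | m1+1, m2+1 =>
        rw [PySem.Chars.replace.go]
        conv_rhs => rw [PySem.Chars.replace.go]
        by_cases hp : old.isPrefixOf (c :: t)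
        · simp only [hp, if_true]
          have holdlen : 1 ≤ old.length := by
            cases old with | nil => exact absurd rfl hold | cons _ _ => simp
          have hdl : (List.drop old.length (c :: t)).length = t.length + 1 - old.length := by
            simp
          exact ih _ (by omega) m1 m2 _ (by omega) (by omega)
        · simp only [hp, Bool.false_eq_true, if_false]
          exact ih t (by omega) m1 m2 _ (by omega) (by omega)

theorem pvPrefixDotFalse {old : List Char} (hold : old ≠ []) (hdot : '.' ∉ old) :
    old.isPrefixOf ['.'] = false := by
  by_contra h
  simp only [Bool.not_eq_false] at h
  have hsub := (List.isPrefixOf_iff_prefix.1 h).subset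
  obtain ⟨x, hx⟩ := List.exists_mem_of_ne_nil old hold
  have := hsub hx
  simp at this
  exact hdot (this ▸ hx)

theorem pvRepGoAppend (old new : List Char) (hold : old ≠ []) (hdot : '.' ∉ old) :
    ∀ (n : Nat) (w : List Char), w.length ≤ n → ∀ (fuel : Nat) (acc : List Char), w.length < fuel →
    PySem.Chars.replace.go old new fuel (w ++ ['.']) acc =
      PySem.Chars.replace.go old new w.length w acc ++ ['.'] := by
  intro n
  induction n with
  | zero =>
    intro w hw fuel acc hf
    have : w = [] := List.eq_nil_of_length_eq_zero (by omega)
    subst this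
    match fuel with
    | m+1 =>
      simp only [List.nil_append, List.length_nil]
      conv_lhs => rw [PySem.Chars.replace.go]
      simp only [pvPrefixDotFalse hold hdot, Bool.false_eq_true, if_false]
      cases m <;> rw [PySem.Chars.replace.go, PySem.Chars.replace.go] <;> try simp
  | succ n ih =>
    intro w hw fuel acc hf
    cases w with
    | nil =>
      match fuel with
      | m+1 =>
        simp only [List.nil_append, List.length_nil]
        conv_lhs => rw [PySem.Chars.replace.go]
        simp only [pvPrefixDotFalse hold hdot, Bool.false_eq_true, if_false]
        cases m <;> rw [PySem.Chars.replace.go, PySem.Chars.replace.go] <;> try simp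
    | cons c t =>
      simp only [List.length_cons] at hw hf
      match fuel with
      | m+1 =>
        have holdlen : 1 ≤ old.length := by
          cases old with | nil => exact absurd rfl hold | cons _ _ => simp
        simp only [List.cons_append, List.length_cons]
        conv_lhs => rw [PySem.Chars.replace.go]
        conv_rhs => rw [PySem.Chars.replace.go]
        by_cases hp : old.isPrefixOf (c :: t)
        · have hple : old.length ≤ t.length + 1 := by
            simpa using (List.isPrefixOf_iff_prefix.1 hp).length_le
          have hp2 : old.isPrefixOf ((c :: t) ++ ['.']) = true := by
            rw [List.isPrefixOf_iff_prefix]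
            exact (List.isPrefixOf_iff_prefix.1 hp).trans (List.prefix_append _ _)
          simp only [List.cons_append] at hp2
          simp only [hp, hp2, if_true]
          have hdropeq : List.drop old.length (c :: (t ++ ['.'])) = List.drop old.length (c :: t) ++ ['.'] := by
            rw [show c :: (t ++ ['.']) = (c :: t) ++ ['.'] by simp, List.drop_append_of_le_length hple]
          rw [hdropeq]
          have hdl : (List.drop old.length (c :: t)).length = t.length + 1 - old.length := by simp
          rw [ih (List.drop old.length (c :: t)) (by omega) m _ (by omega)]
          congr 1
          exact pvRepGoFuel old new hold (t.length + 1) _ (by omega) _ _ _ (by omega) (by omega)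
        · have hp2 : old.isPrefixOf ((c :: t) ++ ['.']) = false := by
            by_contra hcon
            simp only [Bool.not_eq_false] at hcon
            have hpre := List.isPrefixOf_iff_prefix.1 hcon
            rcases Nat.le_total old.length (t.length + 1) with hle | hlt2
            · have : old <+: (c :: t) :=
                List.prefix_of_prefix_length_le hpre (List.prefix_append _ _) (by simpa using hle)
              rw [List.isPrefixOf_iff_prefix.2 this] at hp
              exact absurd rfl hp
            · rcases Nat.eq_or_lt_of_le hlt2 with heq | hlt
              · have : old <+: (c :: t) :=
                  List.prefix_of_prefix_length_le hpre (List.prefix_append _ _) (by simp; omega)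
                rw [List.isPrefixOf_iff_prefix.2 this] at hp
                exact absurd rfl hp
              · have hlen := hpre.length_le
                simp at hlen
                have : old = (c :: t) ++ ['.'] := List.IsPrefix.eq_of_length hpre (by simp; omega)
                rw [this] at hdot
                simp at hdot
          simp only [List.cons_append] at hp2
          simp only [hp, hp2, Bool.false_eq_true, if_false]
          exact ih t (by omega) m (c :: acc) (by omega)

theorem pvReplaceAppend (w old new : List Char) (hold : old ≠ []) (hdot : '.' ∉ old) :
    PySem.Chars.replace (w ++ ['.']) old new = PySem.Chars.replace w old new ++ ['.'] := by
  unfold PySem.Chars.replace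
  have hne : old.isEmpty = false := by cases old with | nil => exact absurd rfl hold | cons _ _ => simp
  simp only [hne, Bool.false_eq_true, if_false, List.length_append, List.length_singleton]
  exact pvRepGoAppend old new hold hdot w.length w (le_refl _) (w.length + 1) [] (by omega)

theorem pvFieldsCore (w : List Char) :
    pvCommaLoopA (w ++ ['.']) ((w ++ ['.']).length + 2) 0 [] =
      (PySem.Chars.splitOn w [',']).map (fun f => PySem.List.slice f (some 1) none) := by
  rw [pvInnerAux (w ++ ['.']) _ 0 [] (by omega) (by simp)]
  simp only [List.drop_zero, List.nil_append]
  rw [pvMyFieldsAppend]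
  apply List.map_congr_left
  intro f _
  rw [PySem.List.slice_from_one, List.drop_one]

theorem pvFriendsEq (segrest : List Char) :
    pvSplitFriendsA (segrest ++ ['.']) =
      PySem.Dict.empty.insert ("friends".toList)
        ((PySem.Chars.splitOn (PySem.Chars.replace segrest (" is connected to".toList) []) [',']).map
          (fun f => PySem.List.slice f (some 1) none)) := by
  unfold pvSplitFriendsA
  rw [pvReplaceAppend segrest _ _ (by decide) (by decide)]
  dsimp only
  rw [pvFieldsCore]

theorem pvGamesEq (segrest : List Char) :
    pvSplitGamesA (segrest ++ ['.']) =
      PySem.Dict.empty.insert ("games".toList)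
        ((PySem.Chars.splitOn (PySem.Chars.replace segrest (" likes to play".toList) []) [',']).map
          (fun g => PySem.List.slice g (some 1) none)) := by
  unfold pvSplitGamesA
  rw [pvReplaceAppend segrest _ _ (by decide) (by decide)]
  dsimp only
  rw [pvFieldsCore]

theorem pvTakeSucc (l : List Char) (x : Char) (r : List Char) :
    (l ++ x :: r).take (l.length + 1) = l ++ [x] := by
  have h1 : l ++ x :: r = (l ++ [x]) ++ r := by simp
  rw [h1, List.take_left' (by simp)]

theorem pvOuter (cs : List Char) : ∀ (fuel start : Nat)
    (d : PySem.Dict (List Char) (PySem.Dict (List Char) (List (List Char)))),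
    start ≤ cs.length → cs.length - start < fuel →
    (∀ seg ∈ (PySem.Chars.splitOn (cs.drop start) ['.']).dropLast, ' ' ∈ seg) →
    pvLoopA cs fuel start d = ((PySem.Chars.splitOn (cs.drop start) ['.']).dropLast).foldl pvStepB d := by
  intro fuel
  induction fuel with
  | zero => intro start d h1 h2 h3; omega
  | succ n ih =>
    intro start d hs hf hpre
    simp only [pvLoopA]
    rw [PySem.Chars.findFrom_natCast cs ['.'] start hs]
    by_cases hdot : '.' ∈ cs.drop start
    · obtain ⟨seg, rest, he, hnseg⟩ := pvDecomp hdot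
      have hfdot : PySem.Chars.find (cs.drop start) ['.'] = (seg.length : Int) := by
        rw [he]; exact pvFindPos hnseg rest
      rw [hfdot]
      have hlen : cs.length - start = seg.length + 1 + rest.length := by
        have := congrArg List.length he; simp at this; omega
      have hne1 : ¬ ((seg.length : Int) = -1) := by omega
      simp only [hne1, if_false]
      have hne2 : ¬ ((start : Int) + (seg.length : Int) = -1) := by omega
      simp only [hne2, if_false]
      -- sentence list
      have hsplit : PySem.Chars.splitOn (cs.drop start) ['.'] = seg :: PySem.Chars.splitOn rest ['.'] := by
        rw [he]; exact pvSP2 hnseg rest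
      rw [hsplit, List.dropLast_cons_of_ne_nil (pvSplitOnNeNil rest)]
      have hsp : ' ' ∈ seg := hpre seg (by rw [hsplit, List.dropLast_cons_of_ne_nil (pvSplitOnNeNil rest)]; exact List.mem_cons_self)
      obtain ⟨s1, s2, hseg, hns1⟩ := pvDecomp hsp
      have hu : cs.drop start = s1 ++ ' ' :: (s2 ++ '.' :: rest) := by
        rw [he, hseg]; simp
      -- nameEnd
      rw [PySem.Chars.findFrom_natCast cs [' '] start hs]
      have hfsp : PySem.Chars.find (cs.drop start) [' '] = (s1.length : Int) := by
        rw [hu]; exact pvFindPos hns1 _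
      rw [hfsp]
      have hne3 : ¬ ((s1.length : Int) = -1) := by omega
      simp only [hne3, if_false]
      -- name slice
      have hname : PySem.List.slice cs (some (start : Int)) (some ((start : Int) + (s1.length : Int))) = s1 := by
        rw [PySem.List.slice_natCast_add, hu, List.take_left]
      -- rest slice
      have hseg1 : s1.length ≤ seg.length := by
        have := congrArg List.length hseg; simp at this; omega
      have hrest : PySem.List.slice cs (some ((start : Int) + (s1.length : Int))) (some ((start : Int) + (seg.length : Int) + 1)) =
          seg.drop s1.length ++ ['.'] := by
        have hc1 : ((start : Int) + (s1.length : Int)) = ((start + s1.length : Nat) : Int) := by push_cast; ring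
        have hc2 : ((start : Int) + (seg.length : Int) + 1) = ((start + seg.length + 1 : Nat) : Int) := by push_cast; ring
        rw [hc1, hc2, PySem.List.slice_natCast]
        have hd : List.drop (start + s1.length) cs = seg.drop s1.length ++ '.' :: rest := by
          rw [← pvDropDrop, he, List.drop_append_of_le_length hseg1]
        rw [hd]
        have hn1 : start + seg.length + 1 - (start + s1.length) = (seg.drop s1.length).length + 1 := by
          simp; omega
        rw [hn1, pvTakeSucc]
      rw [hname, hrest]
      -- foldl step on B's side
      rw [List.foldl_cons]
      -- B's step computes the same dict
      have hstep : pvStepB d seg =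
          (if d.contains s1 = false then
            d.insert s1 (pvSplitFriendsA (seg.drop s1.length ++ ['.']))
          else
            d.modify s1 PySem.Dict.empty
              (fun inner => inner.update (pvSplitGamesA (seg.drop s1.length ++ ['.'])).items)) := by
        unfold pvStepB
        dsimp only
        have hfsp2 : PySem.Chars.find seg [' '] = (s1.length : Int) := by
          rw [hseg]; exact pvFindPos hns1 _
        rw [hfsp2]
        have hnm : PySem.List.slice seg none (some ((s1.length : Nat) : Int)) = s1 := by
          rw [PySem.List.slice_to_natCast, hseg, List.take_left]
        have hrst : PySem.List.slice seg (some ((s1.length : Nat) : Int)) none = seg.drop s1.length := by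
          rw [PySem.List.slice_from_natCast]
        rw [hnm, hrst]
        by_cases hcont : d.contains s1 = false
        · rw [if_pos hcont, if_pos hcont, pvFriendsEq]
        · rw [if_neg hcont, if_neg hcont]
          have hfun : (fun inner : PySem.Dict (List Char) (List (List Char)) =>
              inner.update (pvSplitGamesA (List.drop s1.length seg ++ ['.'])).items) =
              (fun inner : PySem.Dict (List Char) (List (List Char)) =>
                inner.insert ("games".toList)
                  ((PySem.Chars.splitOn (PySem.Chars.replace (List.drop s1.length seg) (" likes to play".toList) []) [',']).map
                    (fun g => PySem.List.slice g (some 1) none))) := by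
            funext inner
            rw [pvGamesEq, pvUpdateSingle]
          rw [hfun]
      rw [← hstep]
      -- recurse
      have htn : ((start : Int) + (seg.length : Int)).toNat + 1 = start + seg.length + 1 := by omega
      rw [htn]
      have hdrop : cs.drop (start + seg.length + 1) = rest := by
        have harith : start + seg.length + 1 = start + (seg.length + 1) := by omega
        rw [harith, ← pvDropDrop, he]
        simp
      rw [ih (start + seg.length + 1) (pvStepB d seg) (by omega) (by omega) (by rw [hdrop]; intro x hx; exact hpre x (by rw [hsplit, List.dropLast_cons_of_ne_nil (pvSplitOnNeNil rest)]; exact List.mem_cons_of_mem _ hx)), hdrop]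
    · rw [pvFindNeg hdot]
      simp only [reduceIte]
      rw [pvSP1 hdot]
      simp


-- ===== VERDICT (by name: the statement is the Claim_ definition above) =====
theorem create_data_structure_spec : Claim_equal_create_data_structure := by
  unfold Claim_equal_create_data_structure
  intro s hdom hpre
  unfold Spec_create_data_structure create_data_structure create_data_structure_alt
  congr 1
  have h0 := pvOuter s.toList (s.toList.length + 2) 0 PySem.Dict.empty (by omega) (by omega)
    (by simpa using hpre)
  simpa using h0
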